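-- pv_equiv track=rewrite | github.com/CheungBH/yolov7 | strategy/utils.py | return_plus
-- ===== SOURCE A (Python) =====
-- def return_plus(states, box):
--     updated_states = states.copy()
--     approach_intervals = []
--     start = None
--     for i, state in enumerate(states):
--         if state == 'return':
--             if start is None:
--                 start = i
--         else:
--             if start is not None:
--                 approach_intervals.append([start, i - 1])
--                 start = None
--     if start is not None:  # 处理最后一个区间
--         approach_intervals.append([start, len(states) - 1])
--     for interval in approach_intervals:
--         start, end = interval
--         current_boxes = box[start:end + 1]
--         min_width_index = min(range(len(current_boxes)), key=lambda i: current_boxes[i][2] - current_boxes[i][0])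
--         min_width_global_index = start + min_width_index
--         for i in range(min_width_global_index,end+1):
--             updated_states[i] = 'ready'
--     return updated_states
-- ===== SOURCE B (Python) =====
-- def return_plus(states, box):
--     out = list(states)
--     best = None  # (global index of smallest-width box in the current 'return' run, its width)
--     for i, state in enumerate(states):
--         if state == 'return':
--             w = box[i][2] - box[i][0]
--             if best is None or w < best[1]:
--                 best = (i, w)
--         else:
--             if best is not None:
--                 for j in range(best[0], i):
--                     out[j] = 'ready'
--                 best = None
--     if best is not None:
--         for j in range(best[0], len(states)):
--             out[j] = 'ready'
--     return out
-- ===== Notes on version B (the rewrite author's own statement) =====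
-- stated objective: simpler
-- what changed: Replaces A's two phases (collect all 'return' intervals into a list, then rescan each interval's box slice with min(range, key=...) and mark) by one fused pass that tracks the running smallest-width index of the current run and marks when the run closes, removing the intervals list, the slice and the rescan.
-- outside the precondition, e.g. on return_plus(['return', 'return'], [[0, 0, 3]]): A returns ['ready', 'ready'], B raises IndexError
import Mathlib
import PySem

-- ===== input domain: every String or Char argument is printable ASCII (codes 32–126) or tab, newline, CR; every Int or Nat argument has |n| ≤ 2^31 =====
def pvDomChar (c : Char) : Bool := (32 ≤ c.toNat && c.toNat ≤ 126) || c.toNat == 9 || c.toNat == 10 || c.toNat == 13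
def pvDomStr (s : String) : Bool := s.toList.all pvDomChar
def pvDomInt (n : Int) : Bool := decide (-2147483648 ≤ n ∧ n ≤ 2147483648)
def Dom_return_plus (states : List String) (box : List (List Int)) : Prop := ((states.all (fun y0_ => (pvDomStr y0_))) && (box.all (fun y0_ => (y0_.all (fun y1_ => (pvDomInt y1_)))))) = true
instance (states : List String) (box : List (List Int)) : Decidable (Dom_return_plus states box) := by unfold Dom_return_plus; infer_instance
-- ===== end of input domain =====

-- B replaces A's collect-intervals-then-rescan structure by one fused pass with a running
-- smallest-width tracker (objective: simpler); equal return values on Pre_ below.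

-- ===== PORT A =====
-- phase-1 loop body of A: collect maximal 'return' intervals into (acc, start)
def rpStepA (st : List (Int × Int) × Option Int) (pr : Int × String) : List (Int × Int) × Option Int :=
  if pr.2 == "return" then
    match st.2 with
    | none => (st.1, some pr.1)
    | some s => (st.1, some s)
  else
    match st.2 with
    | some s => (st.1 ++ [(s, pr.1 - 1)], none)
    | none => (st.1, none)

-- phase-2 loop body of A: slice the boxes of one interval, min(range(len), key=width), mark
def rpMarkIv (box : List (List Int)) (upd : List String) (iv : Int × Int) : List String :=
  let cb := PySem.List.slice box (some iv.1) (some (iv.2 + 1))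
  let mwi := (PySem.List.min? (PySem.List.pyRange 0 (cb.length : Int) 1)
      (fun j => PySem.List.pyGetD (PySem.List.pyGetD cb j []) 2 0
              - PySem.List.pyGetD (PySem.List.pyGetD cb j []) 0 0)).getD 0
  (PySem.List.pyRange (iv.1 + mwi) (iv.2 + 1) 1).foldl
    (fun acc k => PySem.List.pySetD acc k "ready") upd

def return_plus (states : List String) (box : List (List Int)) : List String :=
  let p := (PySem.List.enumerate states 0).foldl rpStepA ([], none)
  let intervals := match p.2 with
    | some s => p.1 ++ [(s, (states.length : Int) - 1)]
    | none => p.1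
  intervals.foldl (rpMarkIv box) states

-- ===== PORT B =====
-- single-pass loop body of B: out is the evolving copy, best = (index, width) of the
-- running smallest-width box of the current 'return' run
def rpStepB (box : List (List Int)) (st : List String × Option (Int × Int)) (pr : Int × String) :
    List String × Option (Int × Int) :=
  if pr.2 == "return" then
    let w := PySem.List.pyGetD (PySem.List.pyGetD box pr.1 []) 2 0
           - PySem.List.pyGetD (PySem.List.pyGetD box pr.1 []) 0 0
    match st.2 with
    | none => (st.1, some (pr.1, w))
    | some bw => if w < bw.2 then (st.1, some (pr.1, w)) else (st.1, some bw)
  else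
    match st.2 with
    | some bw => ((PySem.List.pyRange bw.1 pr.1 1).foldl
        (fun acc k => PySem.List.pySetD acc k "ready") st.1, none)
    | none => (st.1, none)

def return_plus_alt (states : List String) (box : List (List Int)) : List String :=
  let p := (PySem.List.enumerate states 0).foldl (rpStepB box) (states, none)
  match p.2 with
  | some bw => (PySem.List.pyRange bw.1 (states.length : Int) 1).foldl
      (fun acc k => PySem.List.pySetD acc k "ready") p.1
  | none => p.1

-- ===== PRECONDITION & SPEC =====
-- Pre_ excludes inputs where Python A raises (a 'return' index whose box row is shorter than
-- 3 → IndexError, or a run entirely beyond box → empty slice → ValueError on min) and inputs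
-- where box is shorter than a 'return' run but the slice stays nonempty: there A's marks come
-- from a truncated box slice while the natural B raises IndexError there.
def Pre_return_plus (states : List String) (box : List (List Int)) : Prop :=
  ∀ k ∈ List.range states.length,
    states.getD k "" = "return" → k < box.length ∧ 3 ≤ (box.getD k []).length
instance (states : List String) (box : List (List Int)) : Decidable (Pre_return_plus states box) := by
  unfold Pre_return_plus; infer_instance

def pvWitness_return_plus : List String × List (List Int) :=
  (["return", "walk", "return"], [[0, 0, 3, 1], [9, 9, 9], [1, 0, 2]])

def Spec_return_plus (states : List String) (box : List (List Int)) (out : List String) : Prop := out = return_plus_alt states box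
instance (states : List String) (box : List (List Int)) (out : List String) : Decidable (Spec_return_plus states box out) := by unfold Spec_return_plus; infer_instance

-- ===== CLAIM (what is proved, stated in full; the proofs are below) =====
def Claim_equal_return_plus : Prop := ∀ (states : List String) (box : List (List Int)), Dom_return_plus states box → Pre_return_plus states box → Spec_return_plus states box (return_plus states box)

-- ===== LEMMAS AND PROOFS =====

-- the common width key, used by the proofs to describe both programs' minima
def rpW (box : List (List Int)) (j : Int) : Int :=
  PySem.List.pyGetD (PySem.List.pyGetD box j []) 2 0
  - PySem.List.pyGetD (PySem.List.pyGetD box j []) 0 0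

theorem rp_min?_map_aux {α β κ : Type} [LT κ] [DecidableLT κ] (g : α → β) (key : β → κ)
    (l : List α) (acc : Option α) :
    l.foldl (fun a x => match a with
      | none => some (g x)
      | some m => if key (g x) < key m then some (g x) else some m) (acc.map g)
    = (l.foldl (fun a x => match a with
      | none => some x
      | some m => if key (g x) < key (g m) then some x else some m) acc).map g := by
  induction l generalizing acc with
  | nil => rfl
  | cons x t ih =>
    simp only [List.foldl_cons]
    cases acc with
    | none => exact ih (some x)
    | some m =>
      simp only [Option.map_some]
      split_ifs <;> [exact ih (some x); exact ih (some m)]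

theorem rp_min?_map {α β κ : Type} [LT κ] [DecidableLT κ] (g : α → β) (key : β → κ)
    (l : List α) :
    PySem.List.min? (l.map g) key = (PySem.List.min? l (fun x => key (g x))).map g := by
  unfold PySem.List.min?
  rw [List.foldl_map]
  exact rp_min?_map_aux g key l none

theorem rp_min?_congr_aux {α κ : Type} [LT κ] [DecidableLT κ] (l : List α)
    (k1 k2 : α → κ) (h : ∀ x ∈ l, k1 x = k2 x) (acc : Option α)
    (hacc : ∀ m, acc = some m → k1 m = k2 m) :
    l.foldl (fun a x => match a with
      | none => some x
      | some m => if k1 x < k1 m then some x else some m) acc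
    = l.foldl (fun a x => match a with
      | none => some x
      | some m => if k2 x < k2 m then some x else some m) acc := by
  induction l generalizing acc with
  | nil => rfl
  | cons x t ih =>
    have hx : k1 x = k2 x := h x (by simp)
    have ht : ∀ y ∈ t, k1 y = k2 y := fun y hy => h y (by simp [hy])
    simp only [List.foldl_cons]
    cases acc with
    | none =>
      exact ih ht (some x) (by rintro m rfl1; cases rfl1; exact hx)
    | some m =>
      have hm := hacc m rfl
      simp only [hx, hm]
      split_ifs
      · exact ih ht (some x) (by rintro m' hm'; cases hm'; exact hx)
      · exact ih ht (some m) (by rintro m' hm'; cases hm'; exact hm)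

theorem rp_min?_congr_mem {α κ : Type} [LT κ] [DecidableLT κ] (l : List α)
    (k1 k2 : α → κ) (h : ∀ x ∈ l, k1 x = k2 x) :
    PySem.List.min? l k1 = PySem.List.min? l k2 := by
  unfold PySem.List.min?
  exact rp_min?_congr_aux l k1 k2 h none (by simp)

theorem rp_range_shift (sn e1 : Nat) (h : sn ≤ e1) :
    PySem.List.pyRange (sn : Int) (e1 : Int) 1
      = (PySem.List.pyRange 0 ((e1 - sn : Nat) : Int) 1).map (fun j => (sn : Int) + j) := by
  rw [PySem.List.pyRange_one, PySem.List.pyRange_one, List.map_map]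
  have : ((e1 : Int) - sn).toNat = e1 - sn := by omega
  have h2 : (((e1 - sn : Nat) : Int) - 0).toNat = e1 - sn := by omega
  rw [this, h2]
  simp

theorem rp_close (box : List (List Int)) (out : List String) (sn e1 : Nat)
    (hlt : sn < e1) (hbox : e1 ≤ box.length) :
    ∃ j : Int,
      PySem.List.min? (PySem.List.pyRange (sn : Int) (e1 : Int) 1) (rpW box) = some j ∧
      rpMarkIv box out ((sn : Int), (e1 : Int) - 1) =
        (PySem.List.pyRange j (e1 : Int) 1).foldl
          (fun acc k => PySem.List.pySetD acc k "ready") out := by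
  have he : ((e1 : Int) - 1) + 1 = ((e1 : Nat) : Int) := by ring
  have hcb : PySem.List.slice box (some (sn : Int)) (some (((e1 : Int) - 1) + 1))
      = (box.drop sn).take (e1 - sn) := by
    rw [he, PySem.List.slice_natCast]
  have hlen : ((box.drop sn).take (e1 - sn)).length = e1 - sn := by
    simp [List.length_take, List.length_drop]; omega
  set cb := (box.drop sn).take (e1 - sn) with hcbdef
  -- elementwise: cb[j] = box[sn+j]
  have helem : ∀ j ∈ PySem.List.pyRange 0 ((e1 - sn : Nat) : Int) 1,
      (fun j => PySem.List.pyGetD (PySem.List.pyGetD cb j []) 2 0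
              - PySem.List.pyGetD (PySem.List.pyGetD cb j []) 0 0) j
      = (fun j => rpW box ((sn : Int) + j)) j := by
    intro j hj
    rw [PySem.List.mem_pyRange_one] at hj
    obtain ⟨h0, h1⟩ := hj
    obtain ⟨jn, rfl⟩ := Int.eq_ofNat_of_zero_le h0
    have hjn : jn < e1 - sn := by omega
    have : PySem.List.pyGetD cb (jn : Int) [] = PySem.List.pyGetD box ((sn : Int) + jn) [] := by
      rw [PySem.List.pyGetD_natCast]
      have : (sn : Int) + jn = ((sn + jn : Nat) : Int) := by push_cast; ring
      rw [this, PySem.List.pyGetD_natCast]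
      have hin : jn < cb.length := by omega
      have hin2 : sn + jn < box.length := by omega
      rw [List.getD_eq_getElem _ _ hin, List.getD_eq_getElem _ _ hin2]
      simp [hcbdef]
    simp only [rpW, this]
  have hmin :
      PySem.List.min? (PySem.List.pyRange (sn : Int) (e1 : Int) 1) (rpW box)
        = (PySem.List.min? (PySem.List.pyRange 0 ((e1 - sn : Nat) : Int) 1)
            (fun j => PySem.List.pyGetD (PySem.List.pyGetD cb j []) 2 0
              - PySem.List.pyGetD (PySem.List.pyGetD cb j []) 0 0)).map (fun j => (sn : Int) + j) := by
    rw [rp_range_shift sn e1 (le_of_lt hlt), rp_min?_map, rp_min?_congr_mem _ _ _ helem]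
  -- nonempty range → some
  have hne : PySem.List.pyRange 0 ((e1 - sn : Nat) : Int) 1 ≠ [] := by
    intro hnil
    have := congrArg List.length hnil
    rw [PySem.List.length_pyRange_one] at this
    simp at this
    omega
  obtain ⟨m, hm⟩ : ∃ m, PySem.List.min? (PySem.List.pyRange 0 ((e1 - sn : Nat) : Int) 1)
      (fun j => PySem.List.pyGetD (PySem.List.pyGetD cb j []) 2 0
              - PySem.List.pyGetD (PySem.List.pyGetD cb j []) 0 0) = some m := by
    cases hmm : PySem.List.min? (PySem.List.pyRange 0 ((e1 - sn : Nat) : Int) 1)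
      (fun j => PySem.List.pyGetD (PySem.List.pyGetD cb j []) 2 0
              - PySem.List.pyGetD (PySem.List.pyGetD cb j []) 0 0) with
    | none => exact absurd ((PySem.List.min?_eq_none_iff _ _).mp hmm) hne
    | some m => exact ⟨m, rfl⟩
  refine ⟨(sn : Int) + m, by rw [hmin, hm]; rfl, ?_⟩
  show rpMarkIv box out ((sn : Int), (e1 : Int) - 1) = _
  unfold rpMarkIv
  simp only [he]
  rw [(PySem.List.slice_natCast box sn e1).trans hcbdef.symm, hlen, hm]
  rfl

theorem rp_min?_snoc {α κ : Type} [LT κ] [DecidableLT κ] (l : List α) (y : α) (key : α → κ) :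
    PySem.List.min? (l ++ [y]) key = match PySem.List.min? l key with
      | none => some y
      | some m => if key y < key m then some y else some m := by
  unfold PySem.List.min?
  rw [List.foldl_append]
  simp only [List.foldl_cons, List.foldl_nil]
  cases List.foldl (fun acc x => match acc with
      | none => some x
      | some m => if key x < key m then some x else some m) none l <;> rfl

theorem rp_min?_singleton {α κ : Type} [LT κ] [DecidableLT κ] (y : α) (key : α → κ) :
    PySem.List.min? [y] key = some y := rfl

theorem rp_inv (box : List (List Int)) (p : List String) (u : List String)
    (H : ∀ k, k < p.length → p.getD k "" = "return" → k < box.length) :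
    ((PySem.List.enumerate p 0).foldl (rpStepB box) (u, none)).1
      = ((PySem.List.enumerate p 0).foldl rpStepA ([], none)).1.foldl (rpMarkIv box) u ∧
    ((((PySem.List.enumerate p 0).foldl rpStepA ([], none)).2 = none ∧
      ((PySem.List.enumerate p 0).foldl (rpStepB box) (u, none)).2 = none) ∨
     (∃ sn : Nat,
        ((PySem.List.enumerate p 0).foldl rpStepA ([], none)).2 = some (sn : Int) ∧
        sn < p.length ∧
        (∀ k, sn ≤ k → k < p.length → p.getD k "" = "return") ∧
        ((PySem.List.enumerate p 0).foldl (rpStepB box) (u, none)).2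
          = (PySem.List.min? (PySem.List.pyRange (sn : Int) (p.length : Int) 1)
              (rpW box)).map (fun j => (j, rpW box j)))) := by
  induction p using List.reverseRecOn with
  | nil =>
    simp [PySem.List.enumerate_nil]
  | append_singleton q x ih =>
    have Hq : ∀ k, k < q.length → q.getD k "" = "return" → k < box.length := by
      intro k hk hret
      exact H k (by simp; omega) (by rw [List.getD_append _ _ _ _ hk]; exact hret)
    obtain ⟨ih1, ih2⟩ := ih Hq
    have hsnoc : PySem.List.enumerate (q ++ [x]) 0
        = PySem.List.enumerate q 0 ++ [((q.length : Int), x)] := by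
      rw [PySem.List.enumerate_append]
      simp [PySem.List.enumerate_cons, PySem.List.enumerate_nil]
    rw [hsnoc, List.foldl_append, List.foldl_append]
    simp only [List.foldl_cons, List.foldl_nil]
    set aA := (PySem.List.enumerate q 0).foldl rpStepA ([], none) with haA
    set aB := (PySem.List.enumerate q 0).foldl (rpStepB box) (u, none) with haB
    by_cases hx : x = "return"
    · subst hx
      rcases ih2 with ⟨hA2, hB2⟩ | ⟨sn, hA2, hsn, hrun, hB2⟩
      · constructor
        · simp only [rpStepA, rpStepB, hA2, hB2, beq_self_eq_true, if_true]
          exact ih1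
        · right
          refine ⟨q.length, ?_, by simp, ?_, ?_⟩
          · simp [rpStepA, hA2]
          · intro k h1 h2
            simp at h2
            have hk : k = q.length := by omega
            subst hk
            rw [List.getD_append_right _ _ _ _ (le_refl _)]
            simp
          · simp only [rpStepB, hB2, beq_self_eq_true, if_true]
            have hcast : (((q ++ ["return"]).length : Nat) : Int) = (q.length : Int) + 1 := by
              simp
            rw [hcast, PySem.List.pyRange_one_singleton, rp_min?_singleton]
            rfl
      · have hmq : ∃ j : Int, PySem.List.min? (PySem.List.pyRange (sn : Int) (q.length : Int) 1)
            (rpW box) = some j := by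
          cases hmm : PySem.List.min? (PySem.List.pyRange (sn : Int) (q.length : Int) 1) (rpW box) with
          | none =>
            have hnil := (PySem.List.min?_eq_none_iff _ _).mp hmm
            have hlen := congrArg List.length hnil
            rw [PySem.List.length_pyRange_one] at hlen
            simp at hlen
            omega
          | some j => exact ⟨j, rfl⟩
        obtain ⟨j, hj⟩ := hmq
        rw [hj] at hB2
        simp only [Option.map_some] at hB2
        have hwdef : (PySem.List.pyGetD (PySem.List.pyGetD box ((q.length : Nat) : Int) []) 2 0
            - PySem.List.pyGetD (PySem.List.pyGetD box ((q.length : Nat) : Int) []) 0 0)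
            = rpW box ((q.length : Nat) : Int) := rfl
        constructor
        · simp only [rpStepA, rpStepB, hA2, hB2, beq_self_eq_true, if_true]
          split_ifs <;> exact ih1
        · right
          refine ⟨sn, ?_, by simp; omega, ?_, ?_⟩
          · simp [rpStepA, hA2]
          · intro k h1 h2
            simp at h2
            rcases Nat.lt_or_ge k q.length with hk | hk
            · rw [List.getD_append _ _ _ _ hk]
              exact hrun k h1 hk
            · have hk2 : k = q.length := by omega
              subst hk2
              rw [List.getD_append_right _ _ _ _ (le_refl _)]
              simp
          · simp only [rpStepB, hB2, beq_self_eq_true, if_true]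
            have hcast : (((q ++ ["return"]).length : Nat) : Int) = (q.length : Int) + 1 := by
              simp
            rw [hcast, PySem.List.pyRange_one_succ_right (by exact_mod_cast le_of_lt hsn),
              rp_min?_snoc, hj, hwdef]
            split_ifs with hlt <;> simp [hlt]
    · rcases ih2 with ⟨hA2, hB2⟩ | ⟨sn, hA2, hsn, hrun, hB2⟩
      · constructor
        · simp only [rpStepA, rpStepB, hA2, hB2, beq_iff_eq, hx, if_false]
          exact ih1
        · left
          constructor <;> simp [rpStepA, rpStepB, hx, hA2, hB2]
      · have hbox : q.length ≤ box.length := by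
          have h1 : q.getD (q.length - 1) "" = "return" := hrun (q.length - 1) (by omega) (by omega)
          have h2 := Hq (q.length - 1) (by omega) h1
          omega
        have hmq : ∃ j : Int, PySem.List.min? (PySem.List.pyRange (sn : Int) (q.length : Int) 1)
            (rpW box) = some j := by
          cases hmm : PySem.List.min? (PySem.List.pyRange (sn : Int) (q.length : Int) 1) (rpW box) with
          | none =>
            have hnil := (PySem.List.min?_eq_none_iff _ _).mp hmm
            have hlen := congrArg List.length hnil
            rw [PySem.List.length_pyRange_one] at hlen
            simp at hlen
            omega
          | some j => exact ⟨j, rfl⟩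
        obtain ⟨j, hj⟩ := hmq
        rw [hj] at hB2
        simp only [Option.map_some] at hB2
        obtain ⟨j', hj', hmark⟩ := rp_close box aB.1 sn q.length hsn hbox
        rw [hj] at hj'
        cases hj'
        constructor
        · simp only [rpStepA, rpStepB, hA2, hB2, beq_iff_eq, hx, if_false,
            List.foldl_append, List.foldl_cons, List.foldl_nil]
          rw [← ih1]
          exact hmark.symm
        · left
          constructor
          · simp [rpStepA, hx, hA2]
          · simp [rpStepB, hx, hB2]

-- ===== VERDICT (by name: the statement is the Claim_ definition above) =====
theorem return_plus_spec : Claim_equal_return_plus := by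
  intro states box _hdom hpre
  unfold Spec_return_plus
  have H : ∀ k, k < states.length → states.getD k "" = "return" → k < box.length := by
    intro k hk hret
    exact (hpre k (List.mem_range.mpr hk) hret).1
  obtain ⟨h1, h2⟩ := rp_inv box states states H
  rcases h2 with ⟨hA2, hB2⟩ | ⟨sn, hA2, hsn, hrun, hB2⟩
  · simp only [return_plus, return_plus_alt, hA2, hB2]
    exact h1.symm
  · have hbox : states.length ≤ box.length := by
      have hr := hrun (states.length - 1) (by omega) (by omega)
      have h2 := H (states.length - 1) (by omega) hr
      omega
    obtain ⟨j, hj, hmark⟩ :=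
      rp_close box ((PySem.List.enumerate states 0).foldl (rpStepB box) (states, none)).1
        sn states.length hsn hbox
    rw [hj] at hB2
    simp only [Option.map_some] at hB2
    simp only [return_plus, return_plus_alt, hA2, hB2]
    rw [List.foldl_append]
    simp only [List.foldl_cons, List.foldl_nil]
    rw [← h1]
    exact hmark
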